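-- pv_equiv track=rewrite | github.com/Gauransh9958/GFG-POTD | October/24.Modify the Array.py | modifyAndRearrangeArr
-- ===== SOURCE A (Python) =====
-- def modifyAndRearrangeArr(arr):
--     n = len(arr)
--
--     for i in range(n - 1):
--         if arr[i] != 0 and arr[i] == arr[i + 1]:
--             arr[i] *= 2
--             arr[i + 1] = 0
--
--     result = []
--     zero_count = 0
--
--     for num in arr:
--         if num != 0:
--             result.append(num)
--         else:
--             zero_count += 1
--
--     result.extend([0] * zero_count)
--
--     for i in range(n):
--         arr[i] = result[i]
--
--     return arr
-- ===== SOURCE B (Python) =====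
-- def modifyAndRearrangeArr(arr):
--     # Single fused pass: merge adjacent equal pairs and partition at the same
--     # time, then rewrite arr once (same in-place effect as A's final copy loop).
--     nz = []
--     z = 0
--     i = 0
--     n = len(arr)
--     while i < n:
--         x = arr[i]
--         if x != 0 and i + 1 < n and x == arr[i + 1]:
--             nz.append(2 * x)
--             z += 1
--             i += 2
--         elif x != 0:
--             nz.append(x)
--             i += 1
--         else:
--             z += 1
--             i += 1
--     arr[:] = nz + [0] * z
--     return arr
-- ===== Notes on version B (the rewrite author's own statement) =====
-- stated objective: alternative
-- what changed: Replaces A's three passes (index-wise merge pass, list+counter partition pass, copy-back pass) with one fused two-step scan that merges each adjacent equal pair and partitions into non-zeros plus a zero count in the same traversal, then rewrites the array once.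
import Mathlib
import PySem

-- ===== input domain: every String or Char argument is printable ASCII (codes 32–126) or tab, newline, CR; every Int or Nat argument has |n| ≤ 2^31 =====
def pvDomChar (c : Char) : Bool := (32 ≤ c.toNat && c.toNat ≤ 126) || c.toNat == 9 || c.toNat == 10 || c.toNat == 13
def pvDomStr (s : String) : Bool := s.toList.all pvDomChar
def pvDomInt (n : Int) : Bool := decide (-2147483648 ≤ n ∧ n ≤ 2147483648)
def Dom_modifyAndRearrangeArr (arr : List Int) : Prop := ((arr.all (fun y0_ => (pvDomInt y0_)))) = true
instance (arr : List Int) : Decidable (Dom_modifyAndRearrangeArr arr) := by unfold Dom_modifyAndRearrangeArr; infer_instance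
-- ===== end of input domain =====

-- B fuses A's three passes (merge, partition, copy-back) into one scan plus one rewrite; the
-- equivalence proved is about the returned list (both Pythons also mutate `arr` to that value).

-- ===== PORT A =====
-- body of A's first loop: if arr[i] != 0 and arr[i] == arr[i+1]: arr[i] *= 2; arr[i+1] = 0
def pvStepA (a : List Int) (i : Int) : List Int :=
  if PySem.List.pyGetD a i 0 ≠ 0 ∧ PySem.List.pyGetD a i 0 = PySem.List.pyGetD a (i + 1) 0 then
    PySem.List.pySetD (PySem.List.pySetD a i (PySem.List.pyGetD a i 0 * 2)) (i + 1) 0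
  else a

def modifyAndRearrangeArr (arr : List Int) : List Int :=
  let n : Int := arr.length
  -- for i in range(n - 1): merge adjacent equal non-zero pair in place
  let arr1 := (PySem.List.pyRange 0 (n - 1) 1).foldl pvStepA arr
  -- for num in arr: collect non-zeros into result, count zeros
  let p := arr1.foldl
    (fun (q : List Int × Int) num =>
      if num ≠ 0 then (q.1 ++ [num], q.2) else (q.1, q.2 + 1)) ([], 0)
  -- result.extend([0] * zero_count)
  let result := p.1 ++ List.replicate p.2.toNat 0
  -- for i in range(n): arr[i] = result[i]
  (PySem.List.pyRange 0 n 1).foldl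
    (fun a i => PySem.List.pySetD a i (PySem.List.pyGetD result i 0)) arr1

-- ===== PORT B =====
-- B's while-loop over index i, transcribed as recursion on the remaining suffix:
-- lookahead merge + partition into (non-zeros, zero count) in one pass.
def pvAltLoop : List Int → List Int × Nat
  | [] => ([], 0)
  | x :: rest =>
    match rest with
    | y :: rest' =>
      if x ≠ 0 ∧ x = y then
        let p := pvAltLoop rest'
        (2 * x :: p.1, p.2 + 1)
      else if x ≠ 0 then
        let p := pvAltLoop (y :: rest')
        (x :: p.1, p.2)
      else
        let p := pvAltLoop (y :: rest')
        (p.1, p.2 + 1)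
    | [] => if x ≠ 0 then ([x], 0) else ([], 1)

def modifyAndRearrangeArr_alt (arr : List Int) : List Int :=
  let p := pvAltLoop arr
  p.1 ++ List.replicate p.2 0

-- ===== PRECONDITION & SPEC =====
def Spec_modifyAndRearrangeArr (arr : List Int) (out : List Int) : Prop := out = modifyAndRearrangeArr_alt arr
instance (arr : List Int) (out : List Int) : Decidable (Spec_modifyAndRearrangeArr arr out) := by unfold Spec_modifyAndRearrangeArr; infer_instance

-- ===== CLAIM (what is proved, stated in full; the proofs are below) =====
def Claim_equal_modifyAndRearrangeArr : Prop := ∀ (arr : List Int), Dom_modifyAndRearrangeArr arr → Spec_modifyAndRearrangeArr arr (modifyAndRearrangeArr arr)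

-- ===== LEMMAS AND PROOFS =====

-- The merged array A's first loop produces, as a structural recursion.
def pvMerge : List Int → List Int
  | [] => []
  | [x] => [x]
  | x :: y :: rest =>
    if x ≠ 0 ∧ x = y then x * 2 :: 0 :: pvMerge rest else x :: pvMerge (y :: rest)

theorem pvSetAppend (pre t : List Int) (x v : Int) :
    (pre ++ x :: t).set pre.length v = pre ++ v :: t := by
  induction pre with
  | nil => simp
  | cons a pre ih => simp

theorem pvGetAppend (pre t : List Int) (x : Int) :
    (pre ++ x :: t).getD pre.length 0 = x := by
  induction pre with
  | nil => simp
  | cons a pre _ih => simp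

theorem pvGetDAppend (pre t : List Int) (x : Int) :
    PySem.List.pyGetD (pre ++ x :: t) (pre.length : Int) 0 = x := by
  rw [PySem.List.pyGetD_natCast]
  exact pvGetAppend pre t x


theorem pvMergeLoop (l pre : List Int) :
    (PySem.List.pyRange pre.length (pre.length + l.length - 1) 1).foldl pvStepA (pre ++ l)
      = pre ++ pvMerge l := by
  induction l using pvMerge.induct generalizing pre with
  | case1 =>
    rw [PySem.List.pyRange_one_eq_nil (by simp)]
    simp [pvMerge]
  | case2 x =>
    rw [PySem.List.pyRange_one_eq_nil (by simp)]
    simp [pvMerge]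
  | case3 x y rest h ih =>
    rw [PySem.List.pyRange_one_cons (by simp; omega)]
    simp only [List.foldl_cons]
    have g1 : PySem.List.pyGetD (pre ++ x :: y :: rest) (pre.length : Int) 0 = x :=
      pvGetDAppend pre (y :: rest) x
    have g2 : PySem.List.pyGetD (pre ++ x :: y :: rest) ((pre.length : Int) + 1) 0 = y := by
      rw [show ((pre.length : Int) + 1) = (((pre ++ [x]).length : Nat) : Int) by simp,
          show pre ++ x :: y :: rest = (pre ++ [x]) ++ y :: rest by simp]
      exact pvGetDAppend (pre ++ [x]) rest y
    have hstep : pvStepA (pre ++ x :: y :: rest) (pre.length : Int)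
        = pre ++ x * 2 :: 0 :: rest := by
      rw [pvStepA, g1, g2, if_pos h]
      rw [PySem.List.pySetD_natCast]
      have e1 : (pre ++ x :: y :: rest).set pre.length (x * 2) = pre ++ x * 2 :: y :: rest :=
        pvSetAppend pre (y :: rest) x (x * 2)
      rw [e1,
          show ((pre.length : Int) + 1) = (((pre ++ [x * 2]).length : Nat) : Int) by simp,
          show pre ++ x * 2 :: y :: rest = (pre ++ [x * 2]) ++ y :: rest by simp,
          PySem.List.pySetD_natCast]
      rw [pvSetAppend (pre ++ [x * 2]) rest y 0]
      simp
    rw [hstep]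
    by_cases hrest : rest = []
    · subst hrest
      rw [PySem.List.pyRange_one_eq_nil (by simp; omega)]
      simp [pvMerge, if_pos h]
    · have hlen : 0 < rest.length := List.length_pos_iff.mpr hrest
      rw [PySem.List.pyRange_one_cons (by simp; omega)]
      simp only [List.foldl_cons]
      have g3 : PySem.List.pyGetD (pre ++ x * 2 :: 0 :: rest) ((pre.length : Int) + 1) 0 = 0 := by
        rw [show ((pre.length : Int) + 1) = (((pre ++ [x * 2]).length : Nat) : Int) by simp,
            show pre ++ x * 2 :: 0 :: rest = (pre ++ [x * 2]) ++ 0 :: rest by simp]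
        exact pvGetDAppend (pre ++ [x * 2]) rest 0
      have hstep2 : pvStepA (pre ++ x * 2 :: 0 :: rest) ((pre.length : Int) + 1)
          = pre ++ x * 2 :: 0 :: rest := by
        rw [pvStepA, g3, if_neg (by simp)]
      rw [hstep2]
      have ihx := ih (pre ++ [x * 2, 0])
      rw [show pre ++ x * 2 :: 0 :: rest = (pre ++ [x * 2, 0]) ++ rest by simp,
          show ((pre.length : Int) + 1 + 1) = (((pre ++ [x * 2, 0]).length : Nat) : Int) by simp; omega,
          show ((pre.length : Int) + ((x :: y :: rest).length : Nat) - 1)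
              = (((pre ++ [x * 2, 0]).length : Nat) : Int) + (rest.length : Nat) - 1 by simp; omega,
          ihx]
      simp [pvMerge, if_pos h]
  | case4 x y rest h ih =>
    rw [PySem.List.pyRange_one_cons (by simp; omega)]
    simp only [List.foldl_cons]
    have g1 : PySem.List.pyGetD (pre ++ x :: y :: rest) (pre.length : Int) 0 = x :=
      pvGetDAppend pre (y :: rest) x
    have g2 : PySem.List.pyGetD (pre ++ x :: y :: rest) ((pre.length : Int) + 1) 0 = y := by
      rw [show ((pre.length : Int) + 1) = (((pre ++ [x]).length : Nat) : Int) by simp,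
          show pre ++ x :: y :: rest = (pre ++ [x]) ++ y :: rest by simp]
      exact pvGetDAppend (pre ++ [x]) rest y
    have hstep : pvStepA (pre ++ x :: y :: rest) (pre.length : Int) = pre ++ x :: y :: rest := by
      rw [pvStepA, g1, g2, if_neg h]
    rw [hstep]
    have ihx := ih (pre ++ [x])
    rw [show pre ++ x :: y :: rest = (pre ++ [x]) ++ y :: rest by simp,
        show ((pre.length : Int) + 1) = (((pre ++ [x]).length : Nat) : Int) by simp,
        show ((pre.length : Int) + ((x :: y :: rest).length : Nat) - 1)
            = (((pre ++ [x]).length : Nat) : Int) + ((y :: rest).length : Nat) - 1 by simp; omega,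
        ihx]
    simp [pvMerge, if_neg h]

theorem pvPartLoop (l : List Int) (acc : List Int) (c : Int) :
    l.foldl (fun (q : List Int × Int) num =>
      if num ≠ 0 then (q.1 ++ [num], q.2) else (q.1, q.2 + 1)) (acc, c)
      = (acc ++ l.filter (fun x => decide (x ≠ 0)), c + (l.countP (· == 0) : Int)) := by
  induction l generalizing acc c with
  | nil => simp
  | cons x xs ih =>
    simp only [List.foldl_cons]
    by_cases hx : x = 0
    · subst hx
      rw [if_neg (by simp), ih, Prod.mk.injEq]
      constructor
      · simp
      · simp
        ring
    · rw [if_pos hx, ih, Prod.mk.injEq]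
      constructor
      · simp [hx]
      · simp [hx]

theorem pvWriteLoop (a R : List Int) (m : Nat) (hR : R.length = m + a.length) :
    (PySem.List.pyRange (m : Int) ((m : Int) + (a.length : Int)) 1).foldl
      (fun acc i => PySem.List.pySetD acc i (PySem.List.pyGetD R i 0)) (R.take m ++ a)
      = R := by
  induction a generalizing m with
  | nil =>
    rw [PySem.List.pyRange_one_eq_nil (by simp)]
    simp only [List.length_nil, Nat.add_zero] at hR
    simp [List.take_of_length_le (le_of_eq hR)]
  | cons x rest ih =>
    have hm : m < R.length := by simp at hR; omega
    rw [PySem.List.pyRange_one_cons (by simp)]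
    simp only [List.foldl_cons]
    have hset : PySem.List.pySetD (R.take m ++ x :: rest) (m : Int) (PySem.List.pyGetD R (m : Int) 0)
        = R.take (m + 1) ++ rest := by
      rw [PySem.List.pyGetD_natCast, PySem.List.pySetD_natCast]
      have htk : (R.take m).length = m := by simp; omega
      have hs := pvSetAppend (R.take m) rest x (R.getD m 0)
      rw [htk] at hs
      rw [hs]
      have ht := List.take_add_one (l := R) (i := m)
      rw [List.getD_eq_getElem?_getD, List.getElem?_eq_getElem hm]
      rw [ht, List.getElem?_eq_getElem hm]
      simp only [Option.getD_some, Option.toList_some, List.append_assoc, List.singleton_append]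
    simp only [hset]
    rw [show ((m : Int) + ((x :: rest).length : Nat)) = (((m + 1 : Nat)) : Int) + (rest.length : Nat) by simp; omega,
        show ((m : Int) + 1) = (((m + 1 : Nat)) : Int) by simp]
    exact ih (m + 1) (by simp at hR ⊢; omega)

theorem pvAltLoop_eq (l : List Int) :
    pvAltLoop l = ((pvMerge l).filter (fun x => decide (x ≠ 0)), (pvMerge l).countP (· == 0)) := by
  induction l using pvAltLoop.induct with
  | case1 => simp [pvAltLoop, pvMerge]
  | case2 x y rest h ih =>
    have hx2 : x * 2 ≠ 0 := mul_ne_zero h.1 (by norm_num)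
    simp [pvAltLoop, pvMerge, if_pos h, ih, hx2, mul_comm]
  | case3 x y rest h hx ih =>
    have hxy : x ≠ y := fun he => h ⟨hx, he⟩
    simp [pvAltLoop, pvMerge, hxy, ih, hx]
  | case4 x y rest h hx ih =>
    simp at hx
    subst hx
    simp [pvAltLoop, pvMerge, ih]
  | case5 x hx => simp [pvAltLoop, pvMerge, hx]
  | case6 x hx =>
    simp at hx
    subst hx
    simp [pvAltLoop, pvMerge]

theorem pvMerge_length (l : List Int) : (pvMerge l).length = l.length := by
  induction l using pvMerge.induct with
  | case1 => simp [pvMerge]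
  | case2 => simp [pvMerge]
  | case3 x y rest h ih => simp [pvMerge, if_pos h, ih]
  | case4 x y rest h ih => simp [pvMerge, if_neg h] at ih ⊢; omega

-- ===== VERDICT (by name: the statement is the Claim_ definition above) =====
theorem modifyAndRearrangeArr_spec : Claim_equal_modifyAndRearrangeArr := by
  intro arr _
  show modifyAndRearrangeArr arr = modifyAndRearrangeArr_alt arr
  simp only [modifyAndRearrangeArr, modifyAndRearrangeArr_alt]
  have h1 := pvMergeLoop arr []
  simp only [List.nil_append, List.length_nil, Nat.cast_zero, zero_add] at h1
  have h2 := pvPartLoop (pvMerge arr) [] 0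
  simp only [List.nil_append, zero_add] at h2
  have hcomp : (fun a : Int => decide ¬(decide (a ≠ 0) = true)) = (fun t : Int => t == 0) := by
    funext t
    by_cases ht : t = 0 <;> simp [ht]
  have hlen : ((pvMerge arr).filter (fun x => decide (x ≠ 0))
      ++ List.replicate ((pvMerge arr).countP (· == 0)) 0).length = 0 + (pvMerge arr).length := by
    simp only [List.length_append, List.length_replicate, ← List.countP_eq_length_filter,
      Nat.zero_add]
    have hc := List.length_eq_countP_add_countP (l := pvMerge arr) (p := fun x => decide (x ≠ 0))
    rw [hcomp] at hc
    omega
  have h3 := pvWriteLoop (pvMerge arr)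
      ((pvMerge arr).filter (fun x => decide (x ≠ 0))
        ++ List.replicate ((pvMerge arr).countP (· == 0)) 0) 0 hlen
  simp only [Nat.cast_zero, zero_add, List.take_zero, List.nil_append] at h3
  rw [h1, h2]
  simp only [Int.toNat_natCast]
  rw [show ((arr.length : Nat) : Int) = (((pvMerge arr).length : Nat) : Int) by rw [pvMerge_length], h3]
  rw [pvAltLoop_eq]
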